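-- pv_equiv track=rewrite | github.com/stanislavkozlovski/python_exercises | codeforces/divide_by_three.py | rebuild_string
-- ===== SOURCE A (Python) =====
-- def rebuild_string(num, indices):
--     new_str = ''
--     indices = set(indices)
--
--     for idx in range(len(num)):
--         if idx in indices:
--             continue
--         new_str += num[idx]
--
--     while len(new_str) != 0 and new_str[0] == '0':
--         if new_str == '0':
--             return new_str
--         new_str = new_str[1:]
--
--     return new_str
-- ===== SOURCE B (Python) =====
-- def rebuild_string(num, indices):
--     skip = set(indices)
--     leading = True
--     saw = False
--     res = []
--     for idx, ch in enumerate(num):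
--         if idx in skip:
--             continue
--         saw = True
--         if leading:
--             if ch == '0':
--                 continue
--             leading = False
--         res.append(ch)
--     if not res:
--         return '0' if saw else ''
--     return ''.join(res)
-- ===== Notes on version B (the rewrite author's own statement) =====
-- stated objective: alternative
-- what changed: Fuses A's two stages (build filtered string, then while-loop stripping leading zeros with an all-zeros special case) into one enumerate pass that skips leading zeros inline via a leading/saw flag pair and handles the all-zeros and empty cases from the flags.
import Mathlib
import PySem

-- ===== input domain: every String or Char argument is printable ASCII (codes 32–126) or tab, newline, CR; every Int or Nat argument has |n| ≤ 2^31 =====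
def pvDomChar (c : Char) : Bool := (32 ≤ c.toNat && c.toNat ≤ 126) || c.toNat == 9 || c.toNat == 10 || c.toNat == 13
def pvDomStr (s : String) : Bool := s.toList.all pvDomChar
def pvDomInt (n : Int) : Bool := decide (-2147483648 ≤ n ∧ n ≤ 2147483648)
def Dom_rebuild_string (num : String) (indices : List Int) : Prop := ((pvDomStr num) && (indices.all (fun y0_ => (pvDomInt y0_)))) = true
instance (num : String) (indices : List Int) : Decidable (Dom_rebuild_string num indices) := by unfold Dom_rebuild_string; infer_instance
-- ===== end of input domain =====

-- B fuses A's two stages (build the filtered string, then a while-loop stripping leading zeros with an all-zeros special case) into one enumerate pass with leading/saw flags; same return value everywhere.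

-- ===== PORT A =====
-- A's for-loop: append num[idx] for each idx in range(len(num)) not in the index set (chars walked with their index)
def pvAFilter (s : PySem.Set Int) : List Char → Int → List Char
  | [], _ => []
  | c :: rest, idx =>
    if s.contains idx then pvAFilter s rest (idx + 1)
    else c :: pvAFilter s rest (idx + 1)

-- A's while-loop: while nonempty and head is '0': return "0" if the whole string is "0", else drop the head
def pvAStrip : List Char → List Char
  | [] => []
  | c :: rest =>
    if c = '0' then (if rest = [] then ['0'] else pvAStrip rest)
    else c :: rest

def rebuild_string (num : String) (indices : List Int) : String :=
  String.ofList (pvAStrip (pvAFilter (PySem.Set.ofList indices) num.toList 0))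

-- ===== PORT B =====
-- Source B's single for-loop over enumerate(num) with state (leading, saw, res)
def pvBLoop (skip : PySem.Set Int) : List Char → Int → Bool → Bool → List Char → (Bool × List Char)
  | [], _, _, saw, res => (saw, res)
  | ch :: rest, idx, leading, saw, res =>
    if skip.contains idx then pvBLoop skip rest (idx + 1) leading saw res
    else if leading then
      (if ch = '0' then pvBLoop skip rest (idx + 1) leading true res
       else pvBLoop skip rest (idx + 1) false true (res ++ [ch]))
    else pvBLoop skip rest (idx + 1) leading true (res ++ [ch])

def rebuild_string_alt (num : String) (indices : List Int) : String :=
  let r := pvBLoop (PySem.Set.ofList indices) num.toList 0 true false []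
  if r.2 = [] then (if r.1 then "0" else "") else String.ofList r.2

-- ===== PRECONDITION & SPEC =====
def Spec_rebuild_string (num : String) (indices : List Int) (out : String) : Prop := out = rebuild_string_alt num indices
instance (num : String) (indices : List Int) (out : String) : Decidable (Spec_rebuild_string num indices out) := by unfold Spec_rebuild_string; infer_instance

-- ===== CLAIM (what is proved, stated in full; the proofs are below) =====
def Claim_equal_rebuild_string : Prop := ∀ (num : String) (indices : List Int), Dom_rebuild_string num indices → Spec_rebuild_string num indices (rebuild_string num indices)

-- ===== LEMMAS AND PROOFS =====

-- B's loop with the skip test removed (proof helper only)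
def pvBPure : List Char → Bool → Bool → List Char → (Bool × List Char)
  | [], _, saw, res => (saw, res)
  | ch :: rest, leading, _saw, res =>
    if leading then
      (if ch = '0' then pvBPure rest leading true res
       else pvBPure rest false true (res ++ [ch]))
    else pvBPure rest leading true (res ++ [ch])

theorem pvBLoop_filter (skip : PySem.Set Int) (cs : List Char) :
    ∀ (idx : Int) (leading saw : Bool) (res : List Char),
      pvBLoop skip cs idx leading saw res = pvBPure (pvAFilter skip cs idx) leading saw res := by
  induction cs with
  | nil => intro idx leading saw res; simp [pvBLoop, pvAFilter, pvBPure]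
  | cons ch rest ih =>
    intro idx leading saw res
    simp only [pvBLoop, pvAFilter]
    by_cases hs : idx ∈ skip
    · simp [hs, ih]
    · simp [hs, pvBPure]
      by_cases hl : leading
      · by_cases hz : ch = '0' <;> simp [hl, hz, ih]
      · simp [hl, ih]

theorem pvBPure_eval (f : List Char) :
    ∀ (leading saw : Bool) (res : List Char),
      pvBPure f leading saw res =
        ((saw || !f.isEmpty), res ++ (if leading then f.dropWhile (· = '0') else f)) := by
  induction f with
  | nil => intro leading saw res; simp [pvBPure]
  | cons ch rest ih =>
    intro leading saw res
    simp only [pvBPure]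
    by_cases hl : leading
    · by_cases hz : ch = '0'
      · simp [hl, hz, ih, List.dropWhile]
      · simp [hl, hz, ih, List.dropWhile]
    · simp [hl, ih]

theorem pvAStrip_eval (f : List Char) :
    pvAStrip f =
      if f.dropWhile (· = '0') = [] then (if f = [] then [] else ['0'])
      else f.dropWhile (· = '0') := by
  induction f with
  | nil => simp [pvAStrip]
  | cons c rest ih =>
    simp only [pvAStrip]
    by_cases hz : c = '0'
    · by_cases hr : rest = []
      · simp [hz, hr, List.dropWhile]
      · simp [hz, hr, List.dropWhile, ih]
    · simp [hz, List.dropWhile]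

-- ===== VERDICT (by name: the statement is the Claim_ definition above) =====
theorem rebuild_string_spec : Claim_equal_rebuild_string := by
  intro num indices _
  unfold Spec_rebuild_string rebuild_string rebuild_string_alt
  rw [pvBLoop_filter]
  set f := pvAFilter (PySem.Set.ofList indices) num.toList 0 with hf
  rw [pvBPure_eval, pvAStrip_eval]
  by_cases hdw : f.dropWhile (· = '0') = []
  · by_cases hfe : f = []
    · simp [hfe]
    · simp [hdw, hfe]
  · have : f ≠ [] := by intro h; simp [h] at hdw
    simp [hdw]
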